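-- pv_equiv track=rewrite | github.com/Laki-man3/Programmer | Программирование Т-банк/2.py | fmbc
-- ===== SOURCE A (Python) =====
-- def fmbc(n, a):
--     res = []
--     for ai in a:
--         mcost = -1
--         for i in range(101):
--             for j in range(i + 1, 101):
--                 for k in range(j + 1, 101):
--                     cost = 2**i + 2**j + 2**k
--                     if cost <= ai:
--                         mcost = max(mcost, cost)
--         res.append(mcost)
--     return res
-- ===== SOURCE B (Python) =====
-- def fmbc(n, a):
--     # Greedy from the highest bit: the best sum of three distinct powers of two
--     # <= ai is the largest integer <= ai with exactly three set bits at positions <= 100.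
--     out = []
--     for ai in a:
--         total = 0
--         need = 3
--         for p in range(100, -1, -1):
--             if need and p >= need - 1 and total + (1 << p) + (1 << (need - 1)) - 1 <= ai:
--                 total += 1 << p
--                 need -= 1
--         out.append(total if need == 0 else -1)
--     return out
-- ===== Notes on version B (the rewrite author's own statement) =====
-- stated objective: faster
-- what changed: Replaces the O(101^3) brute-force enumeration of all exponent triples per element with a single greedy descending scan over bit positions that reserves room for the remaining smaller powers, picking the largest feasible power three times.
import Mathlib
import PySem

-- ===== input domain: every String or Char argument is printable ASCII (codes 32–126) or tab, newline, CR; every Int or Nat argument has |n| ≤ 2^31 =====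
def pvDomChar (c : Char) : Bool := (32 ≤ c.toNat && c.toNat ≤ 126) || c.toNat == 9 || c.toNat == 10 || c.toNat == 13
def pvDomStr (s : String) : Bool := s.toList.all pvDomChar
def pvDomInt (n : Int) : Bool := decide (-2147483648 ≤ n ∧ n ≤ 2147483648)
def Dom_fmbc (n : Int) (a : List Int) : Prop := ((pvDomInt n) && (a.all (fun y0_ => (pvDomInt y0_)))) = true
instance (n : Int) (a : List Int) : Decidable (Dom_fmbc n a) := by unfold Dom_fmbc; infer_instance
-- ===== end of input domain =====

-- B changes the per-element search: instead of A's brute-force scan of all 101^3/6 exponent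
-- triples, it greedily picks, from the highest bit position down, the largest power of two
-- that still leaves room for the remaining smaller distinct powers (objective: faster).

-- ===== PORT A =====
-- A's inner triple loop for one element ai ('2**i' ported as 2^i.toNat — exact since every i in the range is ≥ 0).
def fmbcInner (ai : Int) : Int :=
  (PySem.List.pyRange 0 101 1).foldl (fun m i =>
    (PySem.List.pyRange (i + 1) 101 1).foldl (fun m j =>
      (PySem.List.pyRange (j + 1) 101 1).foldl (fun m k =>
        let cost : Int := 2 ^ i.toNat + 2 ^ j.toNat + 2 ^ k.toNat
        if cost ≤ ai then max m cost else m) m) m) (-1)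

def fmbc (n : Int) (a : List Int) : List Int :=
  a.foldl (fun res ai => res ++ [fmbcInner ai]) []

-- ===== PORT B =====
-- One step of B's greedy loop: state (total, need), bit position p ('1 << p' ported as
-- 2^p.toNat — exact since every p in the range is ≥ 0; 'need and …' is need ≠ 0).
def fmbcStep (ai : Int) (s : Int × Int) (p : Int) : Int × Int :=
  if s.2 ≠ 0 ∧ p ≥ s.2 - 1 ∧ s.1 + 2 ^ p.toNat + 2 ^ (s.2 - 1).toNat - 1 ≤ ai then
    (s.1 + 2 ^ p.toNat, s.2 - 1)
  else s

def fmbcGreedy (ai : Int) : Int :=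
  let st := (PySem.List.pyRange 100 (-1) (-1)).foldl (fmbcStep ai) (0, 3)
  if st.2 == 0 then st.1 else -1

def fmbc_alt (n : Int) (a : List Int) : List Int :=
  a.foldl (fun out ai => out ++ [fmbcGreedy ai]) []

-- ===== PRECONDITION & SPEC =====
def Spec_fmbc (n : Int) (a : List Int) (out : List Int) : Prop := out = fmbc_alt n a
instance (n : Int) (a : List Int) (out : List Int) : Decidable (Spec_fmbc n a out) := by unfold Spec_fmbc; infer_instance

-- ===== CLAIM (what is proved, stated in full; the proofs are below) =====
def Claim_equal_fmbc : Prop := ∀ (n : Int) (a : List Int), Dom_fmbc n a → Spec_fmbc n a (fmbc n a)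

-- ===== LEMMAS AND PROOFS =====

-- 'v is a sum of three distinct powers of two with exponents ≤ 100, and v ≤ ai' (A's search space).
def Feas (ai v : Int) : Prop :=
  ∃ i j k : ℕ, i < j ∧ j < k ∧ k ≤ 100 ∧ v = 2 ^ i + 2 ^ j + 2 ^ k ∧ v ≤ ai

-- 'v = t plus `need` distinct powers of two with exponents < p, and v ≤ ai' (B's remaining search space).
def Reach (ai : Int) (p need : ℕ) (t v : Int) : Prop :=
  ∃ S : Finset ℕ, S.card = need ∧ (∀ e ∈ S, e < p) ∧ v = t + ∑ e ∈ S, (2:ℤ) ^ e ∧ v ≤ ai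

-- Proof-side form of B's greedy loop over positions p-1, …, 0 with a ℕ-valued `need`.
def GN (ai : Int) : ℕ → ℕ → Int → Int × ℕ
  | 0, need, t => (t, need)
  | p + 1, need, t =>
    if need ≠ 0 ∧ need - 1 ≤ p ∧ t + 2 ^ p + 2 ^ (need - 1) - 1 ≤ ai then
      GN ai p (need - 1) (t + 2 ^ p)
    else GN ai p need t

-- generic fold facts for A's running-max loops
theorem foldl_ge {α : Type} {f : Int → α → Int} (hf : ∀ m x, m ≤ f m x) :
    ∀ (l : List α) (m : Int), m ≤ l.foldl f m := by
  intro l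
  induction l with
  | nil => intro m; simp
  | cons x t ih => intro m; exact le_trans (hf m x) (ih (f m x))

theorem foldl_ge_of_mem {α : Type} {f : Int → α → Int} (hf : ∀ m x, m ≤ f m x)
    {c : Int} {x : α} (hc : ∀ m, c ≤ f m x) :
    ∀ (l : List α), x ∈ l → ∀ m, c ≤ l.foldl f m := by
  intro l
  induction l with
  | nil => intro hx; cases hx
  | cons y t ih =>
    intro hx m
    rcases List.mem_cons.mp hx with h | h
    · subst h; exact le_trans (hc m) (foldl_ge hf t (f m x))
    · exact ih h (f m y)

theorem foldl_pres {α : Type} {P : Int → Prop} {f : Int → α → Int} :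
    ∀ {l : List α}, (∀ m x, x ∈ l → P m → P (f m x)) → ∀ m, P m → P (l.foldl f m) := by
  intro l
  induction l with
  | nil => intro _ m hm; exact hm
  | cons y t ih =>
    intro h m hm
    exact ih (fun m x hx => h m x (List.mem_cons_of_mem y hx)) (f m y) (h m y List.mem_cons_self hm)

-- sum-of-powers estimates
theorem sum_range_two_pow (p : ℕ) : ∑ e ∈ Finset.range p, (2:ℤ) ^ e = 2 ^ p - 1 := by
  induction p with
  | zero => simp
  | succ p ih => rw [Finset.sum_range_succ, ih]; ring

theorem sum_two_pow_ub {S : Finset ℕ} {p : ℕ} (h : ∀ e ∈ S, e < p) :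
    ∑ e ∈ S, (2:ℤ) ^ e ≤ 2 ^ p - 1 := by
  rw [← sum_range_two_pow]
  exact Finset.sum_le_sum_of_subset_of_nonneg
    (fun e he => Finset.mem_range.mpr (h e he)) (fun e _ _ => by positivity)

theorem sum_two_pow_lb {S : Finset ℕ} {m : ℕ} (h : S.card = m) :
    (2:ℤ) ^ m - 1 ≤ ∑ e ∈ S, (2:ℤ) ^ e := by
  classical
  induction m generalizing S with
  | zero => simp [Finset.card_eq_zero.mp h]
  | succ m ih =>
    have hne : S.Nonempty := Finset.card_pos.mp (by omega)
    obtain ⟨x, hx, hmax⟩ := S.exists_max_image id hne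
    have hcard : (S.erase x).card = m := by rw [Finset.card_erase_of_mem hx, h]; omega
    have hsum := ih hcard
    have hxge : m ≤ x := by
      have hsub : S ⊆ Finset.range (x+1) :=
        fun e he => Finset.mem_range.mpr (Nat.lt_succ_of_le (hmax e he))
      have := Finset.card_le_card hsub
      rw [Finset.card_range, h] at this; omega
    have heq : ∑ e ∈ S, (2:ℤ)^e = 2^x + ∑ e ∈ S.erase x, (2:ℤ)^e := by
      rw [← Finset.add_sum_erase S _ hx]
    rw [heq]
    have h2 : (2:ℤ)^m ≤ 2^x := pow_le_pow_right₀ (by norm_num) hxge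
    have h3 : (2:ℤ)^(m+1) = 2^m + 2^m := by ring
    linarith

-- named forms of A's three nested loop steps (proof-side only; definitionally equal to fmbcInner's body)
def stepK (ai i j : Int) (m k : Int) : Int :=
  if 2 ^ i.toNat + 2 ^ j.toNat + 2 ^ k.toNat ≤ ai then
    max m (2 ^ i.toNat + 2 ^ j.toNat + 2 ^ k.toNat)
  else m

def foldK (ai i j m : Int) : Int := (PySem.List.pyRange (j + 1) 101 1).foldl (stepK ai i j) m

def foldJ (ai i m : Int) : Int := (PySem.List.pyRange (i + 1) 101 1).foldl (fun m j => foldK ai i j m) m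

theorem fmbcInner_eq (ai : Int) :
    fmbcInner ai = (PySem.List.pyRange 0 101 1).foldl (fun m i => foldJ ai i m) (-1) := rfl

theorem stepK_ge (ai i j : Int) : ∀ m k, m ≤ stepK ai i j m k := by
  intro m k
  unfold stepK
  split
  · exact le_max_left _ _
  · exact le_refl m

theorem foldK_ge (ai i j : Int) : ∀ m, m ≤ foldK ai i j m :=
  fun m => foldl_ge (stepK_ge ai i j) _ m

theorem foldJ_ge (ai i : Int) : ∀ m, m ≤ foldJ ai i m :=
  fun m => foldl_ge (fun m j => foldK_ge ai i j m) _ m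

-- A-side characterisation
theorem fmbcInner_le (ai v : Int) (hv : Feas ai v) : v ≤ fmbcInner ai := by
  obtain ⟨i, j, k, hij, hjk, hk, hveq, hvle⟩ := hv
  rw [fmbcInner_eq]
  have hcK : ∀ m, v ≤ stepK ai (i:Int) (j:Int) m (k:Int) := by
    intro m
    unfold stepK
    simp only [Int.toNat_natCast]
    rw [← hveq, if_pos hvle]
    exact le_max_right _ _
  have hmemK : ((k:Int)) ∈ PySem.List.pyRange ((j:Int) + 1) 101 1 :=
    PySem.List.mem_pyRange_one.mpr ⟨by exact_mod_cast hjk, by exact_mod_cast Nat.lt_succ_of_le hk⟩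
  have hcJ : ∀ m, v ≤ foldK ai (i:Int) (j:Int) m :=
    foldl_ge_of_mem (stepK_ge ai i j) hcK _ hmemK
  have hmemJ : ((j:Int)) ∈ PySem.List.pyRange ((i:Int) + 1) 101 1 :=
    PySem.List.mem_pyRange_one.mpr ⟨by exact_mod_cast hij, by exact_mod_cast (by omega : j < 101)⟩
  have hcI : ∀ m, v ≤ foldJ ai (i:Int) m :=
    foldl_ge_of_mem (fun m x => foldK_ge ai i x m) hcJ _ hmemJ
  have hmemI : ((i:Int)) ∈ PySem.List.pyRange 0 101 1 :=
    PySem.List.mem_pyRange_one.mpr ⟨by positivity, by exact_mod_cast (by omega : i < 101)⟩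
  exact foldl_ge_of_mem (fun m x => foldJ_ge ai x m) hcI _ hmemI (-1)

theorem fmbcInner_mem (ai : Int) : fmbcInner ai = -1 ∨ Feas ai (fmbcInner ai) := by
  rw [fmbcInner_eq]
  refine foldl_pres (P := fun m => m = -1 ∨ Feas ai m) ?_ (-1) (Or.inl rfl)
  intro m i hi hm
  obtain ⟨hi0, hi1⟩ := PySem.List.mem_pyRange_one.mp hi
  refine foldl_pres (P := fun m => m = -1 ∨ Feas ai m) ?_ m hm
  intro m j hj hm
  obtain ⟨hj0, hj1⟩ := PySem.List.mem_pyRange_one.mp hj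
  refine foldl_pres (P := fun m => m = -1 ∨ Feas ai m) ?_ m hm
  intro m k hk hm
  obtain ⟨hk0, hk1⟩ := PySem.List.mem_pyRange_one.mp hk
  unfold stepK
  split
  · rename_i hcost
    have hFeas : Feas ai (2 ^ i.toNat + 2 ^ j.toNat + 2 ^ k.toNat) := by
      refine ⟨i.toNat, j.toNat, k.toNat, ?_, ?_, ?_, rfl, hcost⟩
      · omega
      · omega
      · omega
    rcases max_choice m (2 ^ i.toNat + 2 ^ j.toNat + 2 ^ k.toNat) with h | h <;> rw [h]
    · exact hm
    · exact Or.inr hFeas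
  · exact hm

-- B-side: the fold over pyRange 100 (-1) (-1) is GN with 101 positions
theorem step_cast (ai t : Int) (need N : ℕ) :
    fmbcStep ai (t, (need:Int)) (N:Int)
      = if need ≠ 0 ∧ need - 1 ≤ N ∧ t + 2 ^ N + 2 ^ (need - 1) - 1 ≤ ai then
          (t + 2 ^ N, ((need - 1 : ℕ) : Int))
        else (t, (need:Int)) := by
  cases need with
  | zero => simp [fmbcStep]
  | succ m =>
    have h1 : ((m + 1 : ℕ) : Int) - 1 = (m : Int) := by push_cast; ring
    have hcond : ((((m+1:ℕ)):Int) ≠ 0 ∧ (N:Int) ≥ ((m+1:ℕ):Int) - 1 ∧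
        t + 2 ^ ((N:Int)).toNat + 2 ^ (((m+1:ℕ):Int) - 1).toNat - 1 ≤ ai)
        ↔ ((m+1) ≠ 0 ∧ (m+1) - 1 ≤ N ∧ t + 2 ^ N + 2 ^ ((m+1) - 1) - 1 ≤ ai) := by
      rw [h1]
      simp only [Int.toNat_natCast]
      constructor
      · rintro ⟨-, h2, h3⟩
        exact ⟨Nat.succ_ne_zero m, by exact_mod_cast h2, by simpa using h3⟩
      · rintro ⟨-, h2, h3⟩
        exact ⟨by exact_mod_cast Nat.succ_ne_zero m, by exact_mod_cast h2, by simpa using h3⟩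
    by_cases hc : (m+1) ≠ 0 ∧ (m+1) - 1 ≤ N ∧ t + 2 ^ N + 2 ^ ((m+1) - 1) - 1 ≤ ai
    · rw [if_pos hc]
      unfold fmbcStep
      rw [if_pos (hcond.mpr hc)]
      simp only [Int.toNat_natCast, h1]
      constructor
    · rw [if_neg hc]
      unfold fmbcStep
      rw [if_neg (fun h => hc (hcond.mp h))]

theorem foldGN (ai : Int) : ∀ (N : ℕ) (need : ℕ) (t : Int),
    ((List.range N).map (fun k : ℕ => ((N:Int) - 1 - (k:Int)))).foldl (fmbcStep ai) (t, (need:Int))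
      = ((GN ai N need t).1, ((GN ai N need t).2 : Int)) := by
  intro N
  induction N with
  | zero => intro need t; simp [GN]
  | succ N ih =>
    intro need t
    have hlist : (List.range (N+1)).map (fun k : ℕ => (((N+1:ℕ)):Int) - 1 - (k:Int))
        = ((N:Int)) :: (List.range N).map (fun k : ℕ => ((N:Int) - 1 - (k:Int))) := by
      rw [List.range_succ_eq_map, List.map_cons, List.map_map]
      congr 1
      · push_cast; ring
      · refine List.map_congr_left (fun k _ => ?_)
        simp only [Function.comp_apply]
        push_cast; ring
    rw [hlist]
    simp only [List.foldl_cons]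
    rw [step_cast]
    have hGN : GN ai (N+1) need t
        = if need ≠ 0 ∧ need - 1 ≤ N ∧ t + 2 ^ N + 2 ^ (need - 1) - 1 ≤ ai then
            GN ai N (need - 1) (t + 2 ^ N)
          else GN ai N need t := rfl
    by_cases hc : need ≠ 0 ∧ need - 1 ≤ N ∧ t + 2 ^ N + 2 ^ (need - 1) - 1 ≤ ai
    · rw [if_pos hc, ih, hGN, if_pos hc]
    · rw [if_neg hc, ih, hGN, if_neg hc]

theorem fold_eq_GN (ai : Int) :
    (PySem.List.pyRange 100 (-1) (-1)).foldl (fmbcStep ai) (0, 3)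
      = ((GN ai 101 3 0).1, ((GN ai 101 3 0).2 : Int)) := by
  have h := foldGN ai 101 3 0
  have hl : PySem.List.pyRange 100 (-1) (-1)
      = (List.range 101).map (fun k : ℕ => (((101:ℕ)):Int) - 1 - (k:Int)) := by
    rw [PySem.List.pyRange_neg_one]
    norm_num
    rfl
  rw [hl]
  exact_mod_cast h

-- greedy optimality
theorem reach_mono {ai t v : Int} {p need : ℕ} (h : Reach ai p need t v) :
    Reach ai (p + 1) need t v := by
  obtain ⟨S, hcard, hlt, hveq, hvle⟩ := h
  exact ⟨S, hcard, fun e he => Nat.lt_succ_of_lt (hlt e he), hveq, hvle⟩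

theorem GN_spec (ai : Int) : ∀ (p need : ℕ) (t : Int),
    ((∃ v, Reach ai p need t v) →
      (GN ai p need t).2 = 0 ∧ Reach ai p need t (GN ai p need t).1 ∧
        ∀ v, Reach ai p need t v → v ≤ (GN ai p need t).1)
    ∧ (need ≠ 0 → (¬ ∃ v, Reach ai p need t v) → GN ai p need t = (t, need)) := by
  intro p
  induction p with
  | zero =>
    intro need t
    constructor
    · rintro ⟨v, S, hcard, hlt, hveq, hvle⟩
      have hS : S = ∅ :=
        Finset.eq_empty_of_forall_notMem fun e he => absurd (hlt e he) (Nat.not_lt_zero e)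
      subst hS
      simp only [Finset.card_empty] at hcard
      simp only [Finset.sum_empty, add_zero] at hveq
      refine ⟨by simp [GN]; omega, ⟨∅, by simp; omega, by simp, by simp [GN], by simp [GN, ← hveq]; exact hvle⟩, ?_⟩
      rintro w ⟨S', hcard', hlt', hweq', hwle'⟩
      have : S' = ∅ :=
        Finset.eq_empty_of_forall_notMem fun e he => absurd (hlt' e he) (Nat.not_lt_zero e)
      subst this
      simp only [Finset.sum_empty, add_zero] at hweq'
      simp [GN, hweq']
    · intro _ _; rfl
  | succ p ih =>
    intro need t
    have hGN : GN ai (p+1) need t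
        = if need ≠ 0 ∧ need - 1 ≤ p ∧ t + 2 ^ p + 2 ^ (need - 1) - 1 ≤ ai then
            GN ai p (need - 1) (t + 2 ^ p)
          else GN ai p need t := rfl
    have hpow1 : (1:ℤ) ≤ 2 ^ (need - 1) := one_le_pow₀ (by norm_num : (1:ℤ) ≤ 2)
    by_cases hc : need ≠ 0 ∧ need - 1 ≤ p ∧ t + 2 ^ p + 2 ^ (need - 1) - 1 ≤ ai
    · obtain ⟨hne, hple, hfit⟩ := hc
      have hw : Reach ai p (need - 1) (t + 2 ^ p) (t + 2 ^ p + (2 ^ (need - 1) - 1)) :=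
        ⟨Finset.range (need - 1), by simp,
         fun e he => lt_of_lt_of_le (Finset.mem_range.mp he) hple,
         by rw [sum_range_two_pow], by linarith⟩
      obtain ⟨hnd0, hreach, hbound⟩ := (ih (need - 1) (t + 2 ^ p)).1 ⟨_, hw⟩
      have hv0le : t + 2 ^ p + (2 ^ (need - 1) - 1) ≤ (GN ai p (need - 1) (t + 2 ^ p)).1 :=
        hbound _ hw
      have hlift : ∀ w, Reach ai p (need - 1) (t + 2 ^ p) w → Reach ai (p + 1) need t w := by
        rintro w ⟨S, hcard, hlt, hweq, hwle⟩
        have hpS : p ∉ S := fun h => lt_irrefl p (hlt p h)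
        refine ⟨insert p S, ?_, ?_, ?_, hwle⟩
        · rw [Finset.card_insert_of_notMem hpS, hcard]; omega
        · intro e he
          rcases Finset.mem_insert.mp he with rfl | he
          · omega
          · exact Nat.lt_succ_of_lt (hlt e he)
        · rw [Finset.sum_insert hpS, hweq]; ring
      have hdown : ∀ v, Reach ai (p + 1) need t v → v ≤ (GN ai p (need - 1) (t + 2 ^ p)).1 := by
        rintro v ⟨S, hcard, hlt, hveq, hvle⟩
        by_cases hpS : p ∈ S
        · refine hbound v ⟨S.erase p, ?_, ?_, ?_, hvle⟩
          · rw [Finset.card_erase_of_mem hpS, hcard]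
          · intro e he
            have h1 := hlt e (Finset.mem_of_mem_erase he)
            have h2 := Finset.ne_of_mem_erase he
            omega
          · rw [hveq, ← Finset.add_sum_erase S _ hpS]; ring
        · have hallp : ∀ e ∈ S, e < p := by
            intro e he
            have h1 := hlt e he
            rcases Nat.lt_succ_iff_lt_or_eq.mp h1 with h | h
            · exact h
            · exact absurd (h ▸ he) hpS
          have hsle := sum_two_pow_ub hallp
          have : v ≤ t + 2 ^ p - 1 := by rw [hveq]; linarith
          linarith
      refine ⟨fun _ => ?_, fun _ hnex => absurd ⟨_, hlift _ hw⟩ hnex⟩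
      rw [hGN, if_pos ⟨hne, hple, hfit⟩]
      exact ⟨hnd0, hlift _ hreach, hdown⟩
    · have hiff : ∀ v, Reach ai (p + 1) need t v ↔ Reach ai p need t v := by
        intro v
        refine ⟨?_, reach_mono⟩
        rintro ⟨S, hcard, hlt, hveq, hvle⟩
        by_cases hne : need = 0
        · subst hne
          have hS : S = ∅ := Finset.card_eq_zero.mp hcard
          subst hS
          exact ⟨∅, rfl, by simp, hveq, hvle⟩
        · have hsplit : ¬(need - 1 ≤ p) ∨ ¬(t + 2 ^ p + 2 ^ (need - 1) - 1 ≤ ai) := by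
            rcases not_and_or.mp hc with h | h
            · exact absurd (not_not.mp h) hne
            · exact not_and_or.mp h
          rcases hsplit with hlow | hfit
          · exfalso
            have hsub : S ⊆ Finset.range (p + 1) := fun e he => Finset.mem_range.mpr (hlt e he)
            have := Finset.card_le_card hsub
            rw [Finset.card_range, hcard] at this
            omega
          · have hpS : p ∉ S := by
              intro hpS
              have hcard' : (S.erase p).card = need - 1 := by
                rw [Finset.card_erase_of_mem hpS, hcard]
              have hlb := sum_two_pow_lb hcard'
              have hsum : ∑ e ∈ S, (2:ℤ) ^ e = 2 ^ p + ∑ e ∈ S.erase p, (2:ℤ) ^ e :=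
                (Finset.add_sum_erase S _ hpS).symm
              rw [hveq, hsum] at hvle
              have : t + 2 ^ p + 2 ^ (need - 1) - 1 ≤ ai := by linarith
              exact hfit this
            have hallp : ∀ e ∈ S, e < p := by
              intro e he
              have h1 := hlt e he
              rcases Nat.lt_succ_iff_lt_or_eq.mp h1 with h | h
              · exact h
              · exact absurd (h ▸ he) hpS
            exact ⟨S, hcard, hallp, hveq, hvle⟩
      constructor
      · rintro ⟨v, hv⟩
        obtain ⟨h1, h2, h3⟩ := (ih need t).1 ⟨v, (hiff v).mp hv⟩
        rw [hGN, if_neg hc]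
        exact ⟨h1, reach_mono h2, fun w hw => h3 w ((hiff w).mp hw)⟩
      · intro hne hnex
        rw [hGN, if_neg hc]
        exact (ih need t).2 hne fun ⟨w, hw⟩ => hnex ⟨w, reach_mono hw⟩


theorem Feas_iff_Reach (ai v : Int) : Feas ai v ↔ Reach ai 101 3 0 v := by
  constructor
  · rintro ⟨i, j, k, hij, hjk, hk, hveq, hvle⟩
    refine ⟨{i, j, k}, ?_, ?_, ?_, hvle⟩
    · rw [Finset.card_insert_of_notMem (by simp; omega),
        Finset.card_insert_of_notMem (by simp; omega), Finset.card_singleton]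
    · intro e he
      simp only [Finset.mem_insert, Finset.mem_singleton] at he
      rcases he with rfl | rfl | rfl <;> omega
    · rw [Finset.sum_insert (by simp; omega), Finset.sum_insert (by simp; omega),
        Finset.sum_singleton, hveq]
      ring
  · rintro ⟨S, hcard, hlt, hveq, hvle⟩
    obtain ⟨a, b, c, hab, hac, hbc, rfl⟩ := Finset.card_eq_three.mp hcard
    have ha : a < 101 := hlt a (by simp)
    have hb : b < 101 := hlt b (by simp)
    have hcc : c < 101 := hlt c (by simp)
    have hsum : v = 2 ^ a + 2 ^ b + 2 ^ c := by
      rw [hveq, Finset.sum_insert (by simp [hab, hac]),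
        Finset.sum_insert (by simp [hbc]), Finset.sum_singleton]
      ring
    rcases Nat.lt_trichotomy a b with h1 | h1 | h1
    · rcases Nat.lt_trichotomy b c with h2 | h2 | h2
      · exact ⟨a, b, c, h1, h2, by omega, hsum, hvle⟩
      · exact absurd h2 hbc
      · rcases Nat.lt_trichotomy a c with h3 | h3 | h3
        · exact ⟨a, c, b, h3, h2, by omega, by rw [hsum]; ring, hvle⟩
        · exact absurd h3 hac
        · exact ⟨c, a, b, h3, h1, by omega, by rw [hsum]; ring, hvle⟩
    · exact absurd h1 hab
    · rcases Nat.lt_trichotomy a c with h2 | h2 | h2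
      · exact ⟨b, a, c, h1, h2, by omega, by rw [hsum]; ring, hvle⟩
      · exact absurd h2 hac
      · rcases Nat.lt_trichotomy b c with h3 | h3 | h3
        · exact ⟨b, c, a, h3, h2, by omega, by rw [hsum]; ring, hvle⟩
        · exact absurd h3 hbc
        · exact ⟨c, b, a, h3, h1, by omega, by rw [hsum]; ring, hvle⟩

theorem Feas_pos {ai v : Int} (hv : Feas ai v) : 0 < v := by
  obtain ⟨i, j, k, _, _, _, hveq, _⟩ := hv
  rw [hveq]
  positivity

theorem inner_eq_greedy (ai : Int) : fmbcInner ai = fmbcGreedy ai := by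
  have hA1 := fmbcInner_mem ai
  simp only [fmbcGreedy, fold_eq_GN]
  by_cases hex : ∃ v, Reach ai 101 3 0 v
  · obtain ⟨hnd, hreach, hbound⟩ := (GN_spec ai 101 3 0).1 hex
    rw [hnd]
    simp only [Nat.cast_zero, beq_self_eq_true, if_true]
    have hgFeas : Feas ai ((GN ai 101 3 0).1) := (Feas_iff_Reach ai _).mpr hreach
    have hle1 : (GN ai 101 3 0).1 ≤ fmbcInner ai := fmbcInner_le ai _ hgFeas
    rcases hA1 with h | h
    · have := Feas_pos hgFeas
      omega
    · exact le_antisymm (hbound _ ((Feas_iff_Reach ai _).mp h)) hle1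
  · rw [(GN_spec ai 101 3 0).2 (by norm_num) hex]
    simp only []
    norm_num
    rcases hA1 with h | h
    · exact h
    · exact absurd ⟨_, (Feas_iff_Reach ai _).mp h⟩ hex

-- ===== VERDICT (by name: the statement is the Claim_ definition above) =====
theorem fmbc_spec : Claim_equal_fmbc := by
  intro n a _
  unfold Spec_fmbc fmbc fmbc_alt
  rw [PySem.List.foldl_append_singleton_eq_map, PySem.List.foldl_append_singleton_eq_map]
  simp [List.map_congr_left (fun ai _ => inner_eq_greedy ai)]
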